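-- pv_equiv track=rewrite | github.com/AntonioRomeroDCI/DTSCode4Traning | MetricFunctions/PyScripts/analizador_java.py | obtener_operadores
-- ===== SOURCE A (Python) =====
-- operadores_java = [
--     '++', '--', '==', '!=', '>=', '<=', '&&', '||', '<<', '>>',
--     '+=', '-=', '*=', '/=', '%=', '&=', '|=', '^=', '<<=', '>>=',
--     '+', '-', '*', '/', '%', '=', '>', '<', '&', '|', '!', '^', '~', '?', ':', '.', '::'
-- ]
--
-- def obtener_operadores(codigo):
--     encontrados = []
--     i = 0
--     while i < len(codigo):
--         encontrado = False
--         for op in operadores_java: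
--             if codigo[i:i+len(op)] == op:
--                 encontrados.append(op)
--                 i += len(op)
--                 encontrado = True
--                 break
--         if not encontrado:
--             i += 1
--     return encontrados
-- ===== SOURCE B (Python) =====
-- import re
--
-- operadores_java = [
--     '++', '--', '==', '!=', '>=', '<=', '&&', '||', '<<', '>>',
--     '+=', '-=', '*=', '/=', '%=', '&=', '|=', '^=', '<<=', '>>=',
--     '+', '-', '*', '/', '%', '=', '>', '<', '&', '|', '!', '^', '~', '?', ':', '.', '::'
-- ]
--
-- _PATRON = re.compile('|'.join(re.escape(op) for op in operadores_java))
--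
-- def obtener_operadores(codigo):
--     return _PATRON.findall(codigo)
-- ===== Notes on version B (the rewrite author's own statement) =====
-- stated objective: faster
-- what changed: Replaces the hand-written while-loop with index slicing and an inner Python-level operator scan by one precompiled regex alternation ('|'.join of the escaped operators in list order) and re.findall; the C-level regex engine removes the interpreted per-character inner loop, and Python's leftmost-first alternation keeps the same tie-breaking.
import Mathlib
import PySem

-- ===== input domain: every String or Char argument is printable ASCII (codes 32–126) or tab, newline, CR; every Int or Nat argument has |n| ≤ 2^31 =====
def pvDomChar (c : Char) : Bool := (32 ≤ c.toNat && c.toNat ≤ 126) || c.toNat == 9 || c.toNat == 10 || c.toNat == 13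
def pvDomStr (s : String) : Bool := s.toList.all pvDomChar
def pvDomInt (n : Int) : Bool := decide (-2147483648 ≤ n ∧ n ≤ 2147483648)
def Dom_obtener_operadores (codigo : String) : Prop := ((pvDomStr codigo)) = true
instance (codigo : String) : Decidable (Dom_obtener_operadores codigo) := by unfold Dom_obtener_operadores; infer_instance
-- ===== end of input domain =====

-- B replaces A's hand-written index/slice scanning loop by one compiled regex
-- alternation ('|'.join of the escaped operators, in list order) and re.findall;
-- same return value, proved equal here.

-- ===== PORT A =====
-- the module-level operator list
def operadores_java : List String :=
  ["++", "--", "==", "!=", ">=", "<=", "&&", "||", "<<", ">>",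
   "+=", "-=", "*=", "/=", "%=", "&=", "|=", "^=", "<<=", ">>=",
   "+", "-", "*", "/", "%", "=", ">", "<", "&", "|", "!", "^", "~", "?", ":", ".", "::"]

-- inner 'for op in operadores_java: if codigo[i:i+len(op)] == op: … break'
-- (codigo[i:i+len(op)] is PySem.List.slice on the code points)
def pvTryOpsA (s : List Char) (i : Nat) : List String → Option String
  | [] => none
  | op :: rest =>
    if PySem.List.slice s (some (i : Int)) (some ((i : Int) + (op.toList.length : Int))) = op.toList
    then some op
    else pvTryOpsA s i rest

-- the 'while i < len(codigo)' loop; fuel = number of remaining iterations (≥ len - i)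
def pvLoopA (s : List Char) : Nat → Nat → List String → List String
  | 0, _, acc => acc
  | fuel + 1, i, acc =>
    if i < s.length then
      match pvTryOpsA s i operadores_java with
      | some op => pvLoopA s fuel (i + op.toList.length) (acc ++ [op])
      | none => pvLoopA s fuel (i + 1) acc
    else acc

def obtener_operadores (codigo : String) : List String :=
  pvLoopA codigo.toList codigo.toList.length 0 []

-- ===== PORT B =====
-- B compiles re.compile('|'.join(re.escape(op) for op in operadores_java)) and
-- returns _PATRON.findall(codigo).  PySem has no regex engine, so the port is a
-- hand-written, step-exact rendition of what that engine does for a pure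
-- alternation of literals: at each position try the alternatives leftmost-first
-- (Python alternation is first-match, not longest-match); on a match, emit it
-- and resume after the matched text; otherwise advance one character.

-- the alternatives of the compiled pattern: '|'.join escapes each operator of
-- operadores_java in order, so the alternative list is that list itself
def pvAltsB : List String := operadores_java

-- leftmost-first alternation match of the literal alternatives at this position
def pvMatchAltB (t : List Char) : List String → Option String
  | [] => none
  | a :: rest => if a.toList.isPrefixOf t then some a else pvMatchAltB t rest

-- the findall scan over the rest of the input
def pvScanB : List Char → List String
  | [] => []
  | c :: rest =>
    match pvMatchAltB (c :: rest) pvAltsB with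
    | some a => a :: pvScanB (rest.drop (a.toList.length - 1))
    | none => pvScanB rest
  termination_by t => t.length
  decreasing_by
  · simp only [List.length_cons]
    exact Nat.lt_succ_of_le (by simp [List.length_drop])
  · simp

def obtener_operadores_alt (codigo : String) : List String :=
  pvScanB codigo.toList

-- ===== PRECONDITION & SPEC =====
def Spec_obtener_operadores (codigo : String) (out : List String) : Prop := out = obtener_operadores_alt codigo
instance (codigo : String) (out : List String) : Decidable (Spec_obtener_operadores codigo out) := by unfold Spec_obtener_operadores; infer_instance

-- ===== CLAIM (what is proved, stated in full; the proofs are below) =====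
def Claim_equal_obtener_operadores : Prop := ∀ (codigo : String), Dom_obtener_operadores codigo → Spec_obtener_operadores codigo (obtener_operadores codigo)

-- ===== LEMMAS AND PROOFS =====

-- the inner for-loop of A is the alternation match of B at the same position
lemma tryOpsA_eq_matchAltB (s : List Char) (i : Nat) (l : List String) :
    pvTryOpsA s i l = pvMatchAltB (s.drop i) l := by
  induction l with
  | nil => rfl
  | cons op rest ih =>
    simp only [pvTryOpsA, pvMatchAltB, ih, PySem.List.slice_natCast_add]
    by_cases hp : op.toList <+: s.drop i
    · rw [if_pos ((List.prefix_iff_eq_take.mp hp).symm),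
          if_pos (by simpa [List.isPrefixOf_iff_prefix] using hp)]
    · rw [if_neg (fun h => hp (List.prefix_iff_eq_take.mpr h.symm)),
          if_neg (by simpa [List.isPrefixOf_iff_prefix] using hp)]

lemma matchAltB_mem {t : List Char} {l : List String} {a : String}
    (h : pvMatchAltB t l = some a) : a ∈ l := by
  induction l with
  | nil => simp [pvMatchAltB] at h
  | cons b rest ih =>
    simp only [pvMatchAltB] at h
    split at h
    · simp_all
    · exact List.mem_cons_of_mem _ (ih h)

lemma altsB_nonempty : ∀ a ∈ pvAltsB, 1 ≤ a.toList.length := by decide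

-- invariant of A's while loop: with enough fuel it appends B's scan of the tail
lemma loopA_eq_scanB (s : List Char) :
    ∀ (fuel i : Nat) (acc : List String), s.length ≤ i + fuel →
      pvLoopA s fuel i acc = acc ++ pvScanB (s.drop i) := by
  intro fuel
  induction fuel with
  | zero =>
    intro i acc h
    have : s.drop i = [] := List.drop_eq_nil_of_le (by omega)
    simp [pvLoopA, this, pvScanB]
  | succ fuel ih =>
    intro i acc h
    by_cases hi : i < s.length
    · have hdrop : s.drop i = s[i] :: s.drop (i + 1) := List.drop_eq_getElem_cons hi
      have hscan : pvScanB (s.drop i) =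
          match pvMatchAltB (s.drop i) pvAltsB with
          | some a => a :: pvScanB ((s.drop (i + 1)).drop (a.toList.length - 1))
          | none => pvScanB (s.drop (i + 1)) := by
        conv_lhs => rw [hdrop, pvScanB]
        rw [← hdrop]
      rw [pvLoopA]
      simp only [if_pos hi, tryOpsA_eq_matchAltB,
        show operadores_java = pvAltsB from rfl, hscan]
      cases hm : pvMatchAltB (s.drop i) pvAltsB with
      | none =>
        simpa using ih (i + 1) acc (by omega)
      | some a =>
        have ha1 : 1 ≤ a.toList.length := altsB_nonempty a (matchAltB_mem hm)
        have hdd : (s.drop (i + 1)).drop (a.toList.length - 1) = s.drop (i + a.toList.length) := by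
          rw [List.drop_drop]; congr 1; omega
        simp only [hdd]
        rw [ih (i + a.toList.length) (acc ++ [a]) (by omega)]
        simp
    · have : s.drop i = [] := List.drop_eq_nil_of_le (by omega)
      rw [pvLoopA]
      simp [if_neg hi, this, pvScanB]

-- ===== VERDICT (by name: the statement is the Claim_ definition above) =====
theorem obtener_operadores_spec : Claim_equal_obtener_operadores := by
  intro codigo _
  unfold Spec_obtener_operadores obtener_operadores obtener_operadores_alt
  rw [loopA_eq_scanB codigo.toList codigo.toList.length 0 [] (by omega)]
  simp
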